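-- pv_equiv track=rewrite | github.com/marcosseunick/exercicios_faculdade_python | lista_funcoes/ex013.py | criptografar
-- ===== SOURCE A (Python) =====
-- def criptografar(frase: str) -> str:
--     posicao = 0
--     dicionario_criptografado = {}
--     for letra in frase:
--         if letra in dicionario_criptografado:
--             dicionario_criptografado[letra].append(str(posicao))
--         else:
--             dicionario_criptografado[letra] = [str(posicao)]
--         posicao += 1
--
--     # exibir(dicionario_criptografado)
--
--     texto_criptografado = ''
--     for chave in dicionario_criptografado:
--         texto_criptografado += chave + '='
--         texto_criptografado += '&'.join(dicionario_criptografado[chave])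
--         texto_criptografado += '#'
--
--     return texto_criptografado[:-1] + '@' + str(len(frase))
-- ===== SOURCE B (Python) =====
-- def criptografar(frase: str) -> str:
--     ordem = list(dict.fromkeys(frase))
--     partes = []
--     for letra in ordem:
--         posicoes = [str(i) for i, c in enumerate(frase) if c == letra]
--         partes.append(letra + '=' + '&'.join(posicoes))
--     return '#'.join(partes) + '@' + str(len(frase))
-- ===== Notes on version B (the rewrite author's own statement) =====
-- stated objective: alternative
-- what changed: B replaces A's single grouping pass into a dict of position lists (then serialize with trailing-'#' strip) by first deduplicating the characters, then rescanning the whole string per distinct character to collect its positions, and assembling with '#'.join instead of append-and-strip.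
import Mathlib
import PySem

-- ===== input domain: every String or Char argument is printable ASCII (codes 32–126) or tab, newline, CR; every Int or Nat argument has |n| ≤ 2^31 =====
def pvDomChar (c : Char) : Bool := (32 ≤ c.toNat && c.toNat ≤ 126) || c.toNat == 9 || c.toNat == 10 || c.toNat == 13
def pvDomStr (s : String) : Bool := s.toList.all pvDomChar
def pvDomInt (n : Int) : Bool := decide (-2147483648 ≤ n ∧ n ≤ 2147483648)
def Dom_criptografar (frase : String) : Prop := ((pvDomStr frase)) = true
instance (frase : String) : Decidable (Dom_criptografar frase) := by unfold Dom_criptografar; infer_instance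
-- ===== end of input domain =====

-- B re-implements A by a different decomposition (dedup + per-character rescan + '#'.join
-- instead of one grouping pass into a dict + trailing-'#' strip); same cost class, not claimed faster.

-- ===== PORT A =====
def criptografar (frase : String) : String :=
  let cs := frase.toList
  -- posicao = 0; dicionario = {}; for letra in frase: append str(posicao) / start a new list; posicao += 1
  let st := cs.foldl
    (fun (s : PySem.Dict Char (List (List Char)) × Int) letra =>
      let d := s.1
      let d' := if d.contains letra then
                  d.modify letra [] (fun v => v ++ [PySem.Int.toChars s.2])
                else
                  d.insert letra [PySem.Int.toChars s.2]
      (d', s.2 + 1))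
    (PySem.Dict.empty, 0)
  let d := st.1
  -- texto = ''; for chave in d: texto += chave + '=' + '&'.join(d[chave]) + '#'
  let texto := d.keys.foldl
    (fun (acc : List Char) chave =>
      acc ++ [chave, '='] ++ PySem.Chars.join ['&'] (d.getD chave []) ++ ['#']) []
  -- texto[:-1] + '@' + str(len(frase))
  String.ofList (PySem.List.slice texto none (some (-1)) ++ ['@'] ++ PySem.Int.toChars (Int.ofNat cs.length))

-- ===== PORT B =====
def criptografar_alt (frase : String) : String :=
  let cs := frase.toList
  -- ordem = list(dict.fromkeys(frase))
  let ordem := PySem.List.dedup cs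
  -- posicoes = [str(i) for i, c in enumerate(frase) if c == letra]; partes.append(letra + '=' + '&'.join(posicoes))
  let partes := ordem.map (fun letra =>
    [letra, '='] ++
      PySem.Chars.join ['&']
        (((PySem.List.enumerate cs 0).filter (fun p => p.2 == letra)).map
          (fun p => PySem.Int.toChars p.1)))
  -- '#'.join(partes) + '@' + str(len(frase))
  String.ofList (PySem.Chars.join ['#'] partes ++ ['@'] ++ PySem.Int.toChars (Int.ofNat cs.length))

-- ===== PRECONDITION & SPEC =====
def Spec_criptografar (frase : String) (out : String) : Prop := out = criptografar_alt frase
instance (frase : String) (out : String) : Decidable (Spec_criptografar frase out) := by unfold Spec_criptografar; infer_instance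

-- ===== CLAIM (what is proved, stated in full; the proofs are below) =====
def Claim_equal_criptografar : Prop := ∀ (frase : String), Dom_criptografar frase → Spec_criptografar frase (criptografar frase)

-- ===== LEMMAS AND PROOFS =====

-- A's grouping loop (pair state: dict, position counter) IS a fold of modify over the enumerated pairs.
theorem crip_loopA (cs : List Char) (d : PySem.Dict Char (List (List Char))) (p : Int) :
    cs.foldl
      (fun (s : PySem.Dict Char (List (List Char)) × Int) letra =>
        let d := s.1
        let d' := if d.contains letra then
                    d.modify letra [] (fun v => v ++ [PySem.Int.toChars s.2])
                  else
                    d.insert letra [PySem.Int.toChars s.2]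
        (d', s.2 + 1)) (d, p)
    = ((PySem.List.enumerate cs p).foldl
        (fun d q => d.modify q.2 [] (fun v => v ++ [PySem.Int.toChars q.1])) d,
       p + cs.length) := by
  induction cs generalizing d p with
  | nil => simp [PySem.List.enumerate_nil]
  | cons c t ih =>
      rw [PySem.List.enumerate_cons]
      simp only [List.foldl_cons]
      rw [ih]
      have hb : (if d.contains c then d.modify c [] (fun v => v ++ [PySem.Int.toChars p])
                 else d.insert c [PySem.Int.toChars p])
          = d.modify c [] (fun v => v ++ [PySem.Int.toChars p]) := by
        split_ifs with h
        · rfl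
        · simp only [Bool.not_eq_true] at h
          simp [PySem.Dict.modify, PySem.Dict.getD_of_not_contains, h]
      rw [hb]
      refine Prod.ext rfl ?_
      simp only [List.length_cons]
      push_cast; ring

-- stripping the final '#' from the concatenation of '#'-terminated parts is '#'.join
theorem crip_dropLast_join {α : Type} (l : List α) (part : α → List Char) :
    (l.flatMap (fun c => part c ++ ['#'])).dropLast = PySem.Chars.join ['#'] (l.map part) := by
  induction l with
  | nil => simp [PySem.Chars.join_nil]
  | cons x rest ih =>
      cases rest with
      | nil => simp [PySem.Chars.join_singleton]
      | cons q t =>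
          rw [List.map_cons, List.map_cons, PySem.Chars.join_cons_cons]
          have hne : ((q :: t).flatMap (fun c => part c ++ ['#'])) ≠ [] := by
            simp [List.flatMap_cons]
          have hne2 : (['#'] ++ (q :: t).flatMap (fun c => part c ++ ['#'])) ≠ [] := by
            simp
          rw [List.flatMap_cons, List.append_assoc,
            List.dropLast_append_of_ne_nil hne2,
            List.dropLast_append_of_ne_nil hne, ih]
          simp

-- ===== VERDICT (by name: the statement is the Claim_ definition above) =====
theorem criptografar_spec : Claim_equal_criptografar := by
  intro frase _
  unfold Spec_criptografar criptografar criptografar_alt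
  dsimp only
  set cs := frase.toList with hcs
  rw [crip_loopA]
  congr 1
  dsimp only
  have hd : ∀ (c : Char),
      (((PySem.List.enumerate cs 0).foldl
        (fun d q => d.modify q.2 [] (fun v => v ++ [PySem.Int.toChars q.1]))
        PySem.Dict.empty).getD c [])
      = ((PySem.List.enumerate cs 0).filter (fun p => p.2 == c)).map
          (fun p => PySem.Int.toChars p.1) := by
    intro c
    have h := PySem.Dict.getD_foldl_modify_append
      (l := (PySem.List.enumerate cs 0).map (fun q => (q.2, PySem.Int.toChars q.1)))
      (d := (PySem.Dict.empty : PySem.Dict Char (List (List Char)))) (c := c)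
    rw [List.foldl_map] at h
    rw [h]
    simp [List.filter_map, List.map_map, Function.comp_def]
  have hkeys :
      ((PySem.List.enumerate cs 0).foldl
        (fun d q => d.modify q.2 [] (fun v => v ++ [PySem.Int.toChars q.1]))
        PySem.Dict.empty).keys = PySem.List.dedup cs := by
    have h := PySem.Dict.keys_foldl_modify_key
      (l := PySem.List.enumerate cs 0) (key := fun q => q.2)
      (d0 := ([] : List (List Char)))
      (f := fun d q => fun v => v ++ [PySem.Int.toChars q.1])
      (d := (PySem.Dict.empty : PySem.Dict Char (List (List Char))))
    rw [h]
    simp [PySem.List.map_snd_enumerate, PySem.Dict.keys_empty, PySem.Set.update,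
      PySem.List.dedup_eq_ofList, PySem.Set.ofList_eq_foldl]
  rw [PySem.List.slice_to_neg_one, hkeys]
  simp only [hd, List.append_assoc]
  rw [PySem.List.foldl_append_eq_flatMap
    (g := fun chave => [chave, '='] ++
      (PySem.Chars.join ['&']
        (((PySem.List.enumerate cs 0).filter (fun p => p.2 == chave)).map
          (fun p => PySem.Int.toChars p.1)) ++ ['#']))]
  simp only [List.nil_append]
  have hflat := crip_dropLast_join (PySem.List.dedup cs)
    (fun letra => [letra, '='] ++
      PySem.Chars.join ['&']
        (((PySem.List.enumerate cs 0).filter (fun p => p.2 == letra)).map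
          (fun p => PySem.Int.toChars p.1)))
  simp only [List.append_assoc] at hflat
  rw [hflat]
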